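-- pv_equiv track=rewrite | github.com/Kr1sNg/p2y | Data-Structures-and-Algorithms/DSA-spring-2025/w02-List/list_rounds.py | find_rounds
-- ===== SOURCE A (Python) =====
-- def find_rounds(numbers):
--     total = []
--     next_num = 1
--     while next_num <= max(numbers):
--         round = []
--         i = 0
--         while (i < len(numbers)):
--             if numbers[i] == next_num:
--                 round.append(next_num)
--                 next_num += 1
--             i += 1
--         total.append(round)
--     return total
-- ===== SOURCE B (Python) =====
-- def find_rounds(numbers):
--     m = max(numbers)
--     if m < 1:
--         return []
--     pos = {}
--     for i, x in enumerate(numbers):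
--         pos.setdefault(x, []).append(i)
--     total = []
--     round_ = []
--     p = -1
--     for v in range(1, m + 1):
--         idxs = pos[v]
--         nxt = None
--         for idx in idxs:
--             if idx > p:
--                 nxt = idx
--                 break
--         if nxt is None:
--             total.append(round_)
--             round_ = []
--             nxt = idxs[0]
--         p = nxt
--         round_.append(v)
--     total.append(round_)
--     return total
-- ===== Notes on version B (the rewrite author's own statement) =====
-- stated objective: faster
-- what changed: B precomputes a dict mapping each value to its ascending list of occurrence indices, then emits 1..max in one pass over the value range (starting a new round when no occurrence of v lies after the previous pick), instead of A's rescan of the whole list once per round.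
-- outside the precondition, e.g. on find_rounds([2, 2]): A does not finish within the time limit, B raises KeyError; on find_rounds([]): A raises ValueError, B raises ValueError
import Mathlib
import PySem

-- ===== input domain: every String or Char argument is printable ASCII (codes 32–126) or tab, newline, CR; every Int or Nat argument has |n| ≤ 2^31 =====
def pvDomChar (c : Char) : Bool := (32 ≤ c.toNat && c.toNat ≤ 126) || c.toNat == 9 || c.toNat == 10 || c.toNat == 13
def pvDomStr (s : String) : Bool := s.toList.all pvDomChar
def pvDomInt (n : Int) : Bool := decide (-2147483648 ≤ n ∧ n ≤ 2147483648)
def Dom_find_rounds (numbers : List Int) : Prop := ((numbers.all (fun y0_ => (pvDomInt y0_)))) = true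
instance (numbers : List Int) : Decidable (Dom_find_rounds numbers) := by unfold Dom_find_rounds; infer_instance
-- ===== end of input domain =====

-- B replaces A's rescan-the-whole-list-per-round loop by one dict of occurrence index lists,
-- emitting each value 1..max once in a single pass over the value range (objective: faster).

-- B builds a dict of occurrence-index lists once and emits each value 1..max in a single
-- pass over the value range, instead of A's rescan of the whole list once per round.

-- ===== PORT A =====
-- inner 'while i < len(numbers)' loop; state (round, next_num)
def pvInnerScan (numbers : List Int) (i : Nat) (next : Int) (round : List Int) :
    List Int × Int :=
  if i < numbers.length then
    if PySem.List.pyGetD numbers (i : Int) 0 = next then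
      pvInnerScan numbers (i + 1) (next + 1) (round ++ [next])
    else
      pvInnerScan numbers (i + 1) next round
  else (round, next)
termination_by numbers.length - i

-- outer 'while next_num <= max(numbers)' loop; fueled: under Pre_ every iteration advances
-- next_num by at least 1, so the fuel max(numbers).toNat + 1 is never exhausted there
def pvOuterLoop (numbers : List Int) (mx : Int) : Int → List (List Int) → Nat → List (List Int)
  | _, total, 0 => total
  | next, total, fuel + 1 =>
    if next ≤ mx then
      let r := pvInnerScan numbers 0 next []
      pvOuterLoop numbers mx r.2 (total ++ [r.1]) fuel
    else total

def find_rounds (numbers : List Int) : List (List Int) :=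
  match PySem.List.max? numbers (fun x => x) with
  | none => []   -- max([]) raises ValueError; excluded by Pre_
  | some mx => pvOuterLoop numbers mx 1 [] (mx.toNat + 1)

-- ===== PORT B =====
-- pos = {}; for i, x in enumerate(numbers): pos.setdefault(x, []).append(i)
def pvBuildPos (numbers : List Int) : PySem.Dict Int (List Int) :=
  (PySem.List.enumerate numbers 0).foldl
    (fun d q => d.modify q.2 [] (fun l => l ++ [q.1])) PySem.Dict.empty

-- one iteration of B's 'for v in range(1, m+1)' loop; state (total, round_, p)
def pvBStep (pos : PySem.Dict Int (List Int))
    (st : List (List Int) × List Int × Int) (v : Int) :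
    List (List Int) × List Int × Int :=
  let idxs := pos.getD v []
  match idxs.find? (fun idx => decide (st.2.2 < idx)) with
  | some nxt => (st.1, st.2.1 ++ [v], nxt)
  | none => (st.1 ++ [st.2.1], [v], PySem.List.pyGetD idxs 0 0)

def find_rounds_alt (numbers : List Int) : List (List Int) :=
  match PySem.List.max? numbers (fun x => x) with
  | none => []   -- max([]) raises ValueError; excluded by Pre_
  | some m =>
    if m < 1 then []
    else
      let pos := pvBuildPos numbers
      let st := (PySem.List.pyRange 1 (m + 1) 1).foldl (pvBStep pos) ([], [], -1)
      st.1 ++ [st.2.1]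

-- ===== PRECONDITION & SPEC =====
-- Pre_ excludes the empty list (max([]) raises ValueError in A) and lists whose maximum is
-- ≥ 1 while some value in 1..max is absent: on those A's outer loop never advances next_num
-- and loops forever, returning nothing.
def Pre_find_rounds (numbers : List Int) : Prop :=
  numbers ≠ [] ∧
  (PySem.List.max? numbers (fun x => x)).getD 0 ≤ (numbers.length : Int) ∧
  ∀ v ∈ PySem.List.pyRange 1 ((PySem.List.max? numbers (fun x => x)).getD 0 + 1) 1,
    v ∈ numbers
instance (numbers : List Int) : Decidable (Pre_find_rounds numbers) := by
  unfold Pre_find_rounds; infer_instance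

def pvWitness_find_rounds : List Int := [2, 1, 2, 4, 3, -1]

def Spec_find_rounds (numbers : List Int) (out : List (List Int)) : Prop := out = find_rounds_alt numbers
instance (numbers : List Int) (out : List (List Int)) : Decidable (Spec_find_rounds numbers out) := by unfold Spec_find_rounds; infer_instance

-- ===== CLAIM (what is proved, stated in full; the proofs are below) =====
def Claim_equal_find_rounds : Prop := ∀ (numbers : List Int), Dom_find_rounds numbers → Pre_find_rounds numbers → Spec_find_rounds numbers (find_rounds numbers)

-- ===== LEMMAS AND PROOFS =====

-- first index ≥ i holding value v, as A's inner scan would find it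
def pvFirstFrom (numbers : List Int) (i : Nat) (v : Int) : Option Nat :=
  if i < numbers.length then
    if PySem.List.pyGetD numbers (i : Int) 0 = v then some i
    else pvFirstFrom numbers (i + 1) v
  else none
termination_by numbers.length - i

-- ascending list of indices of v in numbers
def pvPosList (numbers : List Int) (v : Int) : List Int :=
  (PySem.List.pyRange 0 (numbers.length : Int) 1).filter
    (fun j => PySem.List.pyGetD numbers j 0 == v)

theorem pvInnerScan_none (numbers : List Int) (v : Int) :
    ∀ (k i : Nat) (round : List Int), numbers.length - i ≤ k →
      pvFirstFrom numbers i v = none → pvInnerScan numbers i v round = (round, v) := by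
  intro k
  induction k with
  | zero =>
      intro i round hk h
      rw [pvInnerScan.eq_def, if_neg (by omega)]
  | succ k ih =>
      intro i round hk h
      by_cases h1 : i < numbers.length
      · rw [pvFirstFrom.eq_def, if_pos h1] at h
        by_cases h2 : PySem.List.pyGetD numbers (i : Int) 0 = v
        · rw [if_pos h2] at h; cases h
        · rw [if_neg h2] at h
          rw [pvInnerScan.eq_def, if_pos h1, if_neg h2]
          exact ih (i + 1) round (by omega) h
      · rw [pvInnerScan.eq_def, if_neg h1]

theorem pvInnerScan_some (numbers : List Int) (v : Int) :
    ∀ (k i : Nat) (round : List Int) (j : Nat), numbers.length - i ≤ k →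
      pvFirstFrom numbers i v = some j →
      pvInnerScan numbers i v round = pvInnerScan numbers (j + 1) (v + 1) (round ++ [v]) := by
  intro k
  induction k with
  | zero =>
      intro i round j hk h
      rw [pvFirstFrom.eq_def, if_neg (by omega)] at h
      cases h
  | succ k ih =>
      intro i round j hk h
      by_cases h1 : i < numbers.length
      · by_cases h2 : PySem.List.pyGetD numbers (i : Int) 0 = v
        · rw [pvFirstFrom.eq_def, if_pos h1, if_pos h2] at h
          simp only [Option.some.injEq] at h
          subst h
          rw [pvInnerScan.eq_def, if_pos h1, if_pos h2]
        · rw [pvFirstFrom.eq_def, if_pos h1, if_neg h2] at h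
          rw [pvInnerScan.eq_def, if_pos h1, if_neg h2]
          exact ih (i + 1) round j (by omega) h
      · rw [pvFirstFrom.eq_def, if_neg h1] at h
        cases h

theorem pvFirstFrom_eq_head?_aux (numbers : List Int) (v : Int) :
    ∀ (k i : Nat), numbers.length - i ≤ k →
      (pvFirstFrom numbers i v).map (fun n => (n : Int)) =
        ((PySem.List.pyRange (i : Int) (numbers.length : Int) 1).filter
          (fun j => PySem.List.pyGetD numbers j 0 == v)).head? := by
  intro k
  induction k with
  | zero =>
      intro i hk
      rw [pvFirstFrom.eq_def, if_neg (by omega),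
        PySem.List.pyRange_one_eq_nil (by exact_mod_cast (by omega : numbers.length ≤ i))]
      simp
  | succ k ih =>
      intro i hk
      by_cases h1 : i < numbers.length
      · rw [PySem.List.pyRange_one_cons (by exact_mod_cast h1)]
        by_cases h2 : PySem.List.pyGetD numbers (i : Int) 0 = v
        · rw [pvFirstFrom.eq_def, if_pos h1, if_pos h2]
          rw [List.filter_cons, if_pos (by simpa using h2)]
          simp
        · rw [pvFirstFrom.eq_def, if_pos h1, if_neg h2]
          rw [List.filter_cons, if_neg (by simpa using h2)]
          have h3 := ih (i + 1) (by omega)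
          push_cast at h3
          exact h3.symm ▸ rfl
      · rw [pvFirstFrom.eq_def, if_neg h1,
          PySem.List.pyRange_one_eq_nil (by exact_mod_cast Nat.le_of_not_lt h1)]
        simp

theorem pvFirstFrom_eq_head? (numbers : List Int) (i : Nat) (v : Int) :
    (pvFirstFrom numbers i v).map (fun n => (n : Int)) =
      ((PySem.List.pyRange (i : Int) (numbers.length : Int) 1).filter
        (fun j => PySem.List.pyGetD numbers j 0 == v)).head? :=
  pvFirstFrom_eq_head?_aux numbers v _ i le_rfl

theorem pvGroupAux (l : List (Int × Int)) (d : PySem.Dict Int (List Int)) (c : Int) :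
    (l.foldl (fun d q => d.modify q.2 [] (fun t => t ++ [q.1])) d).getD c [] =
      d.getD c [] ++ (l.filter (fun q => q.2 == c)).map (·.1) := by
  induction l generalizing d with
  | nil => simp
  | cons q l ih =>
      rw [List.foldl_cons, ih, PySem.Dict.getD_modify, List.filter_cons]
      by_cases h : c = q.2
      · subst h
        rw [if_pos rfl, if_pos (by simp)]
        simp
      · rw [if_neg h, if_neg (by simpa using fun e => h e.symm)]

theorem pvGetD_buildPos (numbers : List Int) (v : Int) :
    (pvBuildPos numbers).getD v [] = pvPosList numbers v := by
  rw [pvBuildPos, pvGroupAux, PySem.Dict.getD_empty, List.nil_append,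
    PySem.List.enumerate_eq_map_pyRange (d := 0), List.filter_map, List.map_map]
  rw [pvPosList]
  exact (List.map_id _)

theorem pvFind?_posList (numbers : List Int) (v : Int) (p : Int) (hp : -1 ≤ p) :
    (pvPosList numbers v).find? (fun idx => decide (p < idx)) =
      (pvFirstFrom numbers (p + 1).toNat v).map (fun n => (n : Int)) := by
  have hp0 : (0:Int) ≤ p + 1 := by omega
  by_cases hle : p + 1 ≤ (numbers.length : Int)
  · have hcast : (((p + 1).toNat : Int)) = p + 1 := Int.toNat_of_nonneg hp0
    rw [pvFirstFrom_eq_head?, hcast]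
    rw [pvPosList, PySem.List.pyRange_one_append 0 (p + 1) (numbers.length : Int) hp0 hle,
      List.filter_append, List.find?_append]
    have h1 : (((PySem.List.pyRange 0 (p + 1) 1).filter
        (fun j => PySem.List.pyGetD numbers j 0 == v)).find?
        (fun idx => decide (p < idx))) = none := by
      rw [List.find?_eq_none]
      intro x hx
      have := (PySem.List.mem_pyRange_one).1 (List.mem_of_mem_filter hx)
      simp only [decide_eq_true_eq]
      omega
    rw [h1, Option.none_or]
    have h2 : ∀ x ∈ ((PySem.List.pyRange (p + 1) (numbers.length : Int) 1).filter
        (fun j => PySem.List.pyGetD numbers j 0 == v)), (decide (p < x)) = true := by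
      intro x hx
      have := (PySem.List.mem_pyRange_one).1 (List.mem_of_mem_filter hx)
      simp only [decide_eq_true_eq]
      omega
    cases hl : ((PySem.List.pyRange (p + 1) (numbers.length : Int) 1).filter
        (fun j => PySem.List.pyGetD numbers j 0 == v)) with
    | nil => simp
    | cons a t =>
        have ha := h2 a (by rw [hl]; exact List.mem_cons_self)
        simp [ha]
  · rw [pvFirstFrom.eq_def, if_neg (by omega)]
    have hnone : (pvPosList numbers v).find? (fun idx => decide (p < idx)) = none := by
      rw [List.find?_eq_none]
      intro x hx
      have := (PySem.List.mem_pyRange_one).1 (List.mem_of_mem_filter hx)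
      simp only [decide_eq_true_eq]
      omega
    rw [hnone]
    rfl

theorem pvMem_of_firstFrom_some (numbers : List Int) (i : Nat) (v : Int) (j : Nat)
    (h : pvFirstFrom numbers i v = some j) : v ∈ numbers := by
  have hh := pvFirstFrom_eq_head? numbers i v
  rw [h] at hh
  have hmem : ((j : Int)) ∈ (PySem.List.pyRange (i : Int) (numbers.length : Int) 1).filter
      (fun j => PySem.List.pyGetD numbers j 0 == v) :=
    List.mem_of_mem_head? (by rw [← hh]; simp)
  rw [List.mem_filter] at hmem
  have h1 := PySem.List.mem_pyRange_one.1 hmem.1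
  have hjl : j < numbers.length := by exact_mod_cast h1.2
  have h2 : numbers.getD j 0 = v := by
    simpa [PySem.List.pyGetD_natCast] using hmem.2
  rw [List.getD_eq_getElem?_getD, List.getElem?_eq_getElem hjl] at h2
  exact h2 ▸ List.getElem_mem hjl

theorem pvFirstFrom_none_of_not_mem (numbers : List Int) (i : Nat) (v : Int)
    (h : v ∉ numbers) : pvFirstFrom numbers i v = none := by
  cases hf : pvFirstFrom numbers i v with
  | none => rfl
  | some j => exact absurd (pvMem_of_firstFrom_some numbers i v j hf) h

theorem pvFirstFrom_zero_some_of_mem (numbers : List Int) (v : Int) (h : v ∈ numbers) :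
    ∃ j, pvFirstFrom numbers 0 v = some j := by
  cases hf : pvFirstFrom numbers 0 v with
  | some j => exact ⟨j, rfl⟩
  | none =>
      exfalso
      have hh := pvFirstFrom_eq_head? numbers 0 v
      rw [hf] at hh
      simp only [Nat.cast_zero] at hh
      obtain ⟨n, hlt, hget⟩ := List.mem_iff_getElem.1 h
      have hq : ((n : Int)) ∈ (PySem.List.pyRange 0 (numbers.length : Int) 1).filter
          (fun j => PySem.List.pyGetD numbers j 0 == v) := by
        rw [List.mem_filter]
        refine ⟨PySem.List.mem_pyRange_one.2 ⟨by positivity, by exact_mod_cast hlt⟩, ?_⟩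
        simp [PySem.List.pyGetD_natCast, List.getD_eq_getElem?_getD,
          List.getElem?_eq_getElem hlt, hget]
      have := List.filter_eq_nil_iff.1 (List.head?_eq_none_iff.1 hh.symm)
      exact absurd hq (by intro hx; exact (this _ (List.mem_of_mem_filter hx)) ((List.mem_filter.1 hx).2))

theorem pvOuterLoop_done (numbers : List Int) (mx next : Int) (total : List (List Int))
    (fuel : Nat) (h : mx < next) : pvOuterLoop numbers mx next total fuel = total := by
  cases fuel with
  | zero => rfl
  | succ f => rw [pvOuterLoop, if_neg (by omega)]

theorem pvMain (numbers : List Int) (mx : Int)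
    (hmax : ∀ x ∈ numbers, x ≤ mx) :
    ∀ (k : Nat) (v p : Int) (total : List (List Int)) (round : List Int) (fuel : Nat),
    (mx + 1 - v).toNat ≤ k →
    1 ≤ v → v ≤ mx + 1 → -1 ≤ p →
    (∀ u : Int, v ≤ u → u ≤ mx → u ∈ numbers) →
    (mx + 1 - v).toNat ≤ fuel →
    (let r := pvInnerScan numbers (p + 1).toNat v round
     pvOuterLoop numbers mx r.2 (total ++ [r.1]) fuel) =
    (let st := (PySem.List.pyRange v (mx + 1) 1).foldl (pvBStep (pvBuildPos numbers))
        (total, round, p)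
     st.1 ++ [st.2.1]) := by
  intro k
  induction k with
  | zero =>
      intro v p total round fuel hk h1 hvm hp hpre hfuel
      have hveq : v = mx + 1 := by omega
      subst hveq
      have hnm : (mx + 1) ∉ numbers := fun hm => by have := hmax _ hm; omega
      simp only
      rw [pvInnerScan_none numbers (mx+1) numbers.length _ round (by omega)
        (pvFirstFrom_none_of_not_mem numbers _ _ hnm)]
      rw [pvOuterLoop_done numbers mx (mx+1) _ fuel (by omega)]
      rw [PySem.List.pyRange_one_eq_nil le_rfl]
      rfl
  | succ k ih =>
      intro v p total round fuel hk h1 hvm hp hpre hfuel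
      by_cases hveq : v = mx + 1
      · subst hveq
        have hnm : (mx + 1) ∉ numbers := fun hm => by have := hmax _ hm; omega
        simp only
        rw [pvInnerScan_none numbers (mx+1) numbers.length _ round (by omega)
          (pvFirstFrom_none_of_not_mem numbers _ _ hnm)]
        rw [pvOuterLoop_done numbers mx (mx+1) _ fuel (by omega)]
        rw [PySem.List.pyRange_one_eq_nil le_rfl]
        rfl
      · have hvle : v ≤ mx := by omega
        have hvmem : v ∈ numbers := hpre v le_rfl hvle
        -- unfold RHS one step
        rw [PySem.List.pyRange_one_cons (by omega : v < mx + 1), List.foldl_cons]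
        have hstep : pvBStep (pvBuildPos numbers) (total, round, p) v =
            match (pvFirstFrom numbers (p + 1).toNat v).map (fun n => (n : Int)) with
            | some nxt => (total, round ++ [v], nxt)
            | none => (total ++ [round], [v], PySem.List.pyGetD (pvPosList numbers v) 0 0) := by
          rw [pvBStep]
          simp only [pvGetD_buildPos, pvFind?_posList numbers v p hp]
        cases hff : pvFirstFrom numbers (p + 1).toNat v with
        | some j =>
            rw [hff] at hstep
            simp at hstep
            rw [hstep]
            have hscan := pvInnerScan_some numbers v numbers.length (p + 1).toNat round j
              (by omega) hff
            rw [hscan]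
            have hcast : (((j : Int)) + 1).toNat = j + 1 := by omega
            have hihr := ih (v + 1) (j : Int) total (round ++ [v]) fuel (by omega) (by omega)
              (by omega) (by omega) (fun u hu1 hu2 => hpre u (by omega) hu2) (by omega)
            simp only at hihr
            rw [hcast] at hihr
            exact hihr
        | none =>
            rw [hff] at hstep
            simp at hstep
            rw [hstep]
            have hscan := pvInnerScan_none numbers v numbers.length (p + 1).toNat round
              (by omega) hff
            rw [hscan]
            -- A starts a fresh outer round
            obtain ⟨f, hfueleq⟩ : ∃ f, fuel = f + 1 := by
              cases fuel with
              | zero => exfalso; omega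
              | succ f => exact ⟨f, rfl⟩
            subst hfueleq
            rw [pvOuterLoop, if_pos hvle]
            obtain ⟨j0, hj0⟩ := pvFirstFrom_zero_some_of_mem numbers v hvmem
            have hscan0 := pvInnerScan_some numbers v numbers.length 0 [] j0 (by omega) hj0
            simp only [List.nil_append] at hscan0
            rw [hscan0]
            -- head of pos list
            have hhead : PySem.List.pyGetD (pvPosList numbers v) 0 0 = (j0 : Int) := by
              have hh := pvFirstFrom_eq_head? numbers 0 v
              rw [hj0] at hh
              simp only [Nat.cast_zero] at hh
              rw [← pvPosList] at hh
              have hh2 : (pvPosList numbers v).head? = some ((j0 : Int)) := by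
                rw [← hh]; simp
              cases hl : pvPosList numbers v with
              | nil => rw [hl] at hh2; simp at hh2
              | cons a t =>
                  rw [hl] at hh2
                  simp only [List.head?_cons, Option.some.injEq] at hh2
                  rw [← hh2]
                  exact PySem.List.pyGetD_zero_cons _ _ _
            rw [hhead]
            have hcast : (((j0 : Int)) + 1).toNat = j0 + 1 := by omega
            have hihr := ih (v + 1) (j0 : Int) (total ++ [round]) [v] f (by omega) (by omega)
              (by omega) (by omega) (fun u hu1 hu2 => hpre u (by omega) hu2) (by omega)
            simp only at hihr
            rw [hcast] at hihr
            exact hihr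

-- ===== VERDICT (by name: the statement is the Claim_ definition above) =====
theorem find_rounds_spec : Claim_equal_find_rounds := by
  intro numbers _hdom hpre
  unfold Spec_find_rounds
  obtain ⟨hne, _, hall⟩ := hpre
  cases hmx : PySem.List.max? numbers (fun x => x) with
  | none => exact absurd ((PySem.List.max?_eq_none_iff _ _).1 hmx) hne
  | some mx =>
      rw [find_rounds, find_rounds_alt, hmx]
      simp only
      by_cases hm1 : mx < 1
      · rw [if_pos hm1]
        rw [pvOuterLoop, if_neg (by omega)]
      · rw [if_neg hm1]
        have hpre' : ∀ u : Int, 1 ≤ u → u ≤ mx → u ∈ numbers := by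
          intro u h1 h2
          apply hall
          rw [hmx]
          exact PySem.List.mem_pyRange_one.2 ⟨h1, by simp; omega⟩
        have hmax : ∀ x ∈ numbers, x ≤ mx := fun x hx => PySem.List.max?_isMax hmx x hx
        have hmain := pvMain numbers mx hmax mx.toNat 1 (-1) [] [] mx.toNat
          (by omega) le_rfl (by omega) (by omega) hpre' (by omega)
        simp only at hmain
        rw [show ((-1 : Int) + 1).toNat = 0 from rfl] at hmain
        rw [pvOuterLoop, if_pos (by omega)]
        exact hmain
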